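-- pv_equiv track=rewrite | github.com/BrunoChiconato/bootcamp-python | dia07/dia07/desafio.py | processar_dados
-- ===== SOURCE A (Python) =====
-- def processar_dados(base_csv: list) -> dict:
--     categorias: dict = {}
--
--     for dicts in base_csv:
--         categoria: str = dicts["Categoria"]
--
--         if categoria not in categorias:
--             categorias[categoria] = []
--
--         categorias[categoria].append(dicts)
--
--     return categorias
-- ===== SOURCE B (Python) =====
-- def processar_dados(base_csv: list) -> dict:
--     # First-appearance order of categories, then one filter pass per category.
--     cats = dict.fromkeys(row["Categoria"] for row in base_csv)
--     return {c: [row for row in base_csv if row["Categoria"] == c] for c in cats}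
-- ===== Notes on version B (the rewrite author's own statement) =====
-- stated objective: alternative
-- what changed: Replaces A's single-pass dict-bucketing (conditional empty-list insert then append) by computing the first-appearance-ordered category list once and building each group with a separate filter pass over the rows.
import Mathlib
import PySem

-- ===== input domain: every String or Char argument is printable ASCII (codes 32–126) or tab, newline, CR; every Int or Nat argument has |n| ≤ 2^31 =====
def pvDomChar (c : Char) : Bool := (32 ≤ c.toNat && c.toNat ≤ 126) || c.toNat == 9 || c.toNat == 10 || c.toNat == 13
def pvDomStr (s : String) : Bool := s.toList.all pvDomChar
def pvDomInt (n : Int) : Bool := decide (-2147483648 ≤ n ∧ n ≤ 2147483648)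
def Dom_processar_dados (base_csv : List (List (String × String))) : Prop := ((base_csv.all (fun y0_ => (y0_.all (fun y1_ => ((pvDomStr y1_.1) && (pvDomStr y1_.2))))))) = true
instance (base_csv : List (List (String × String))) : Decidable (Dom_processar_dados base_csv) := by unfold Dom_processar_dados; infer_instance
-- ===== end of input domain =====

-- B groups by building the first-appearance-ordered category list and filtering the rows once
-- per category (alternative decomposition); return value only, neither side mutates its input.

-- row["Categoria"] (first-match lookup in the association list; Pre_ guarantees the key exists)
def pvCat (row : List (String × String)) : String :=
  (PySem.Dict.mk row).getD "Categoria" ""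

-- ===== PORT A =====
def processar_dados (base_csv : List (List (String × String))) : List (String × List (List (String × String))) :=
  (base_csv.foldl
    (fun categorias dicts =>
      let categoria := pvCat dicts
      let categorias :=
        if categorias.contains categoria then categorias
        else categorias.insert categoria []
      categorias.modify categoria [] (fun l => l ++ [dicts]))
    PySem.Dict.empty).items

-- ===== PORT B =====
def processar_dados_alt (base_csv : List (List (String × String))) : List (String × List (List (String × String))) :=
  let cats := PySem.Set.ofList (base_csv.map pvCat)
  cats.map (fun c => (c, base_csv.filter (fun row => pvCat row == c)))

-- ===== PRECONDITION & SPEC =====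
-- Pre_ excludes rows without a "Categoria" key, on which Python A raises KeyError.
def Pre_processar_dados (base_csv : List (List (String × String))) : Prop :=
  ∀ row ∈ base_csv, "Categoria" ∈ row.map (·.1)
instance (base_csv : List (List (String × String))) : Decidable (Pre_processar_dados base_csv) := by
  unfold Pre_processar_dados; infer_instance

def pvWitness_processar_dados : (List (List (String × String))) :=
  [[("Categoria", "a"), ("Valor", "1")], [("Categoria", "b")], [("Categoria", "a")]]

def Spec_processar_dados (base_csv : List (List (String × String))) (out : List (String × List (List (String × String)))) : Prop := out = processar_dados_alt base_csv
instance (base_csv : List (List (String × String))) (out : List (String × List (List (String × String)))) : Decidable (Spec_processar_dados base_csv out) := by unfold Spec_processar_dados; infer_instance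

-- ===== CLAIM (what is proved, stated in full; the proofs are below) =====
def Claim_equal_processar_dados : Prop := ∀ (base_csv : List (List (String × String))), Dom_processar_dados base_csv → Pre_processar_dados base_csv → Spec_processar_dados base_csv (processar_dados base_csv)

-- ===== LEMMAS AND PROOFS =====

-- A's loop body is a single Dict.modify (the conditional insert of [] is absorbed).
theorem pv_step_eq (d : PySem.Dict String (List (List (String × String)))) (r : List (String × String)) :
    (let c := pvCat r
     let d' := if d.contains c then d else d.insert c []
     d'.modify c [] (fun l => l ++ [r])) =
    d.modify (pvCat r) [] (fun l => l ++ [r]) := by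
  by_cases h : d.contains (pvCat r)
  · simp [h]
  · have hg : d.getD (pvCat r) [] = [] := PySem.Dict.getD_of_not_contains d [] (by simpa using h)
    simp only [h, if_false, Bool.false_eq_true]
    simp [PySem.Dict.modify, PySem.Dict.insert_insert_self,
      PySem.Dict.getD_insert_self, hg]

theorem pv_fold_eq (base_csv : List (List (String × String))) :
    (base_csv.foldl
      (fun categorias dicts =>
        let categoria := pvCat dicts
        let categorias :=
          if categorias.contains categoria then categorias
          else categorias.insert categoria []
        categorias.modify categoria [] (fun l => l ++ [dicts]))
      PySem.Dict.empty) =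
    base_csv.foldl (fun d r => d.modify (pvCat r) [] (fun l => l ++ [r])) PySem.Dict.empty := by
  have hf : (fun (categorias : PySem.Dict String (List (List (String × String)))) dicts =>
      let categoria := pvCat dicts
      let categorias :=
        if categorias.contains categoria then categorias
        else categorias.insert categoria []
      categorias.modify categoria [] (fun l => l ++ [dicts])) =
      (fun d r => d.modify (pvCat r) [] (fun l => l ++ [r])) :=
    funext fun d => funext fun r => pv_step_eq d r
  rw [hf]

theorem pv_getD_fold (base_csv : List (List (String × String))) (c : String) :
    (base_csv.foldl (fun d r => d.modify (pvCat r) [] (fun l => l ++ [r])) PySem.Dict.empty).getD c [] =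
    base_csv.filter (fun row => pvCat row == c) := by
  have h := PySem.Dict.getD_foldl_modify_append
    (l := base_csv.map (fun r => (pvCat r, r)))
    (d := (PySem.Dict.empty : PySem.Dict String (List (List (String × String))))) (c := c)
  rw [List.foldl_map] at h
  simpa [List.filter_map, Function.comp_def] using h

theorem processar_dados_spec : Claim_equal_processar_dados := by
  intro base_csv _ _
  show processar_dados base_csv = processar_dados_alt base_csv
  unfold processar_dados processar_dados_alt
  rw [pv_fold_eq]
  have hnd : (base_csv.foldl (fun d r => d.modify (pvCat r) [] (fun l => l ++ [r])) PySem.Dict.empty).keys.Nodup :=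
    PySem.Dict.nodup_keys_foldl_modify_key base_csv pvCat [] (fun d r l => l ++ [r]) PySem.Dict.empty
      (by simp)
  rw [PySem.Dict.items_eq_map_keys _ hnd []]
  rw [PySem.Dict.keys_foldl_modify_key]
  simp only [PySem.Dict.keys_empty, PySem.Set.update_nil_left]
  exact List.map_congr_left (fun c _ => by rw [pv_getD_fold])
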